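-- pv_equiv track=rewrite | github.com/kihiu-ho/agent-invest | financial_metrics_agent/streamlined_pdf_processor.py | _apply_ascii_offset
-- ===== SOURCE A (Python) =====
-- def _apply_ascii_offset(text: str, offset: int) -> str:
--     """Apply ASCII offset to characters."""
--     result = []
--     for char in text:
--         try:
--             new_ord = ord(char) + offset
--             if 32 <= new_ord <= 126:  # Printable ASCII range
--                 result.append(chr(new_ord))
--             else:
--                 result.append(char)
--         except:
--             result.append(char)
--     return ''.join(result)
-- ===== SOURCE B (Python) =====
-- def _apply_ascii_offset(text: str, offset: int) -> str:
--     """Build a translation table over the distinct characters, then translate in one pass."""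
--     table = {}
--     for c in dict.fromkeys(text):
--         shifted = ord(c) + offset
--         if 32 <= shifted <= 126:
--             table[ord(c)] = chr(shifted)
--     return text.translate(table)
-- ===== Notes on version B (the rewrite author's own statement) =====
-- stated objective: idiomatic
-- what changed: Replaces A's per-character try/append accumulator loop by building a translation table once over the distinct characters (dict.fromkeys) and returning text.translate(table) in a single C-level pass.
import Mathlib
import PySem

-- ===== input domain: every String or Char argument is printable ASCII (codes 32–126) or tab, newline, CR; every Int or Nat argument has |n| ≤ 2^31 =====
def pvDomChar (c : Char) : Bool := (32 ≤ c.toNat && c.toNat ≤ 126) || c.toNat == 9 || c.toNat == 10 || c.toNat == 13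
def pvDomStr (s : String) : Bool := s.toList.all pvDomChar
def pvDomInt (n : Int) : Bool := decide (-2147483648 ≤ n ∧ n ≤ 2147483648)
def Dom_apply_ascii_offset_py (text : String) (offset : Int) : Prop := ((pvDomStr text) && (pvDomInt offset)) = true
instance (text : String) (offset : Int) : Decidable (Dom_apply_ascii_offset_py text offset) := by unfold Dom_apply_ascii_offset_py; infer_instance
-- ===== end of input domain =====

-- B replaces A's per-character accumulate loop by a translation table built once over the
-- distinct characters, followed by a single translate pass (objective: idiomatic).

-- ===== PORT A =====
-- literal transliteration: accumulate shifted-or-unchanged chars, then join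
def apply_ascii_offset_py (text : String) (offset : Int) : String :=
  let result := text.toList.foldl (fun (acc : List Char) (char : Char) =>
    let new_ord : Int := (char.toNat : Int) + offset
    if 32 ≤ new_ord ∧ new_ord ≤ 126 then
      acc ++ [Char.ofNat new_ord.toNat]
    else
      acc ++ [char]) []
  String.ofList result

-- ===== PORT B =====
-- translation table over the distinct characters (dict.fromkeys order = PySem.List.dedup)
def pvTable (text : String) (offset : Int) : PySem.Dict Int Char :=
  (PySem.List.dedup text.toList).foldl (fun t c =>
    let shifted : Int := (c.toNat : Int) + offset
    if 32 ≤ shifted ∧ shifted ≤ 126 then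
      t.insert (c.toNat : Int) (Char.ofNat shifted.toNat)
    else t) PySem.Dict.empty

-- text.translate(table): each char replaced by its table entry, unmapped chars unchanged
def apply_ascii_offset_py_alt (text : String) (offset : Int) : String :=
  let table := pvTable text offset
  String.ofList (text.toList.map (fun c => ((table.get? (c.toNat : Int)).getD c)))

-- ===== PRECONDITION & SPEC =====
def Spec_apply_ascii_offset_py (text : String) (offset : Int) (out : String) : Prop := out = apply_ascii_offset_py_alt text offset
instance (text : String) (offset : Int) (out : String) : Decidable (Spec_apply_ascii_offset_py text offset out) := by unfold Spec_apply_ascii_offset_py; infer_instance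

-- ===== CLAIM (what is proved, stated in full; the proofs are below) =====
def Claim_equal_apply_ascii_offset_py : Prop := ∀ (text : String) (offset : Int), Dom_apply_ascii_offset_py text offset → Spec_apply_ascii_offset_py text offset (apply_ascii_offset_py text offset)

-- ===== LEMMAS AND PROOFS =====

-- what the table-building loop looks up to, for any starting dict
theorem pvTable_get (offset : Int) (l : List Char) (d : PySem.Dict Int Char) (o : Int) :
    (l.foldl (fun t c =>
      let shifted : Int := (c.toNat : Int) + offset
      if 32 ≤ shifted ∧ shifted ≤ 126 then
        t.insert (c.toNat : Int) (Char.ofNat shifted.toNat)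
      else t) d).get? o
    = if (∃ c ∈ l, (c.toNat : Int) = o) ∧ 32 ≤ o + offset ∧ o + offset ≤ 126 then
        some (Char.ofNat (o + offset).toNat)
      else d.get? o := by
  induction l generalizing d with
  | nil => simp
  | cons c l ih =>
    simp only [List.foldl_cons, ih]
    by_cases hco : (c.toNat : Int) = o
    · subst hco
      by_cases hr : 32 ≤ (c.toNat : Int) + offset ∧ (c.toNat : Int) + offset ≤ 126
      · simp [hr]
      · simp [hr]
    · by_cases hr : 32 ≤ (c.toNat : Int) + offset ∧ (c.toNat : Int) + offset ≤ 126
      · simp only [hr, and_true, if_true]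
        rw [PySem.Dict.get?_insert_of_ne _ _ (fun h => hco h.symm)]
        congr 2
        simp [hco]
      · simp only [hr]
        congr 2
        simp [hco]

-- A's loop is the pointwise map
theorem pvA_map (text : String) (offset : Int) (acc : List Char) :
    text.toList.foldl (fun (acc : List Char) (char : Char) =>
      let new_ord : Int := (char.toNat : Int) + offset
      if 32 ≤ new_ord ∧ new_ord ≤ 126 then
        acc ++ [Char.ofNat new_ord.toNat]
      else
        acc ++ [char]) acc
    = acc ++ text.toList.map (fun char =>
        if 32 ≤ (char.toNat : Int) + offset ∧ (char.toNat : Int) + offset ≤ 126 then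
          Char.ofNat ((char.toNat : Int) + offset).toNat
        else char) := by
  induction text.toList generalizing acc with
  | nil => simp
  | cons c l ih =>
    simp only [List.foldl_cons, List.map_cons]
    by_cases hr : 32 ≤ (c.toNat : Int) + offset ∧ (c.toNat : Int) + offset ≤ 126
    · simp only [hr, ih]; simp
    · simp only [hr, ih]; simp

-- ===== VERDICT (by name: the statement is the Claim_ definition above) =====
theorem apply_ascii_offset_py_spec : Claim_equal_apply_ascii_offset_py := by
  intro text offset _
  unfold Spec_apply_ascii_offset_py apply_ascii_offset_py apply_ascii_offset_py_alt pvTable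
  simp only [pvA_map]
  congr 1
  simp only [List.nil_append]
  apply List.map_congr_left
  intro c hc
  rw [pvTable_get]
  by_cases hr : 32 ≤ (c.toNat : Int) + offset ∧ (c.toNat : Int) + offset ≤ 126
  · rw [if_pos (And.intro ⟨c, by simp [hc], rfl⟩ hr)]
    simp [hr]
  · rw [if_neg (by tauto)]
    simp [hr, PySem.Dict.get?_empty]
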